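-- pv_equiv track=rewrite | github.com/nikolay-e/lingua-quiz-app | packages/word-processing/vocab_tools/validation/migration_validator.py | _find_id_gaps
-- ===== SOURCE A (Python) =====
-- from typing import Dict, List, Optional, Set, Tuple
--
-- def _find_id_gaps(id_set: Set[int]) -> List[Tuple[int, int]]:
--     """
--     Find gaps in ID sequences.
--
--     Args:
--         id_set: Set of IDs to check
--
--     Returns:
--         List of (gap_start, gap_end) tuples
--     """
--     if not id_set:
--         return []
--
--     sorted_ids = sorted(id_set)
--     gaps = []
--
--     for i in range(len(sorted_ids) - 1):
--         current_id = sorted_ids[i]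
--         next_id = sorted_ids[i + 1]
--
--         if next_id - current_id > 1:
--             gaps.append((current_id + 1, next_id - 1))
--
--     return gaps
-- ===== SOURCE B (Python) =====
-- from typing import List, Set, Tuple
--
-- def _find_id_gaps(id_set: Set[int]) -> List[Tuple[int, int]]:
--     """Find gaps via run-boundary pairing: a gap starts right after a present
--     value whose successor is missing, and ends right before a present value
--     whose predecessor is missing; sorting and zipping the two boundary lists
--     pairs each gap start with its gap end."""
--     if not id_set:
--         return []
--     lo = min(id_set)
--     hi = max(id_set)
--     starts = sorted(x + 1 for x in id_set if x < hi and x + 1 not in id_set)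
--     ends = sorted(y - 1 for y in id_set if y > lo and y - 1 not in id_set)
--     return list(zip(starts, ends))
-- ===== Notes on version B (the rewrite author's own statement) =====
-- stated objective: alternative
-- what changed: Instead of sorting the IDs and scanning adjacent pairs, B computes the set of gap starts (present x with x+1 missing, x below the max) and gap ends (present y with y-1 missing, y above the min) by membership tests, sorts each boundary list, and zips them into (start, end) pairs.
import Mathlib
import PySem

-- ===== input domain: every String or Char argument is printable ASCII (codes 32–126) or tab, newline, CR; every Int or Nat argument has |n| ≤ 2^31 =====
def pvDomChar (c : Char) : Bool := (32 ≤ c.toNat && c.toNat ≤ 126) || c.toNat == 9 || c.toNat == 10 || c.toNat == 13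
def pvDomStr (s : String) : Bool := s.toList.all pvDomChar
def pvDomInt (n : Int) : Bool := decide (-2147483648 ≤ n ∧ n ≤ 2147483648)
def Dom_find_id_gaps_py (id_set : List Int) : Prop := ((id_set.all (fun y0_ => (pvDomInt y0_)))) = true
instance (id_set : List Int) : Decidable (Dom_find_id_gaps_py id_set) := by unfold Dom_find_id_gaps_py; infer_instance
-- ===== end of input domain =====

-- B replaces A's sort-and-scan-adjacent-pairs with run-boundary pairing: gap starts
-- (present x with x+1 missing) and gap ends (present y with y-1 missing) are found by
-- membership tests, sorted, and zipped; objective: alternative (same asymptotic cost).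

-- ===== PORT A =====
def find_id_gaps_py (id_set : List Int) : List (Int × Int) :=
  if id_set = [] then []
  else
    let sorted_ids := PySem.List.sorted id_set (fun x => x) false
    (PySem.List.pyRange 0 ((sorted_ids.length : Int) - 1) 1).foldl
      (fun gaps i =>
        let current_id := PySem.List.pyGetD sorted_ids i 0
        let next_id := PySem.List.pyGetD sorted_ids (i + 1) 0
        if next_id - current_id > 1 then gaps ++ [(current_id + 1, next_id - 1)] else gaps)
      []

-- ===== PORT B =====
def find_id_gaps_py_alt (id_set : List Int) : List (Int × Int) :=
  if id_set = [] then []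
  else
    let lo := (PySem.List.min? id_set (fun x => x)).getD 0
    let hi := (PySem.List.max? id_set (fun x => x)).getD 0
    let starts := PySem.List.sorted
      ((id_set.filter (fun x => decide (x < hi ∧ x + 1 ∉ id_set))).map (fun x => x + 1))
      (fun x => x) false
    let ends := PySem.List.sorted
      ((id_set.filter (fun y => decide (lo < y ∧ y - 1 ∉ id_set))).map (fun y => y - 1))
      (fun x => x) false
    starts.zip ends

-- ===== PRECONDITION & SPEC =====
-- Pre_ excludes lists with duplicate elements: the Python argument is a set, so only
-- duplicate-free lists represent it; on duplicate lists B's boundary lists can repeat entries.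
def Pre_find_id_gaps_py (id_set : List Int) : Prop := id_set.Nodup
instance (id_set : List Int) : Decidable (Pre_find_id_gaps_py id_set) := by
  unfold Pre_find_id_gaps_py; infer_instance
def pvWitness_find_id_gaps_py : List Int := [3, 1, 7, 8]

def Spec_find_id_gaps_py (id_set : List Int) (out : List (Int × Int)) : Prop := out = find_id_gaps_py_alt id_set
instance (id_set : List Int) (out : List (Int × Int)) : Decidable (Spec_find_id_gaps_py id_set out) := by unfold Spec_find_id_gaps_py; infer_instance

-- ===== CLAIM (what is proved, stated in full; the proofs are below) =====
def Claim_equal_find_id_gaps_py : Prop := ∀ (id_set : List Int), Dom_find_id_gaps_py id_set → Pre_find_id_gaps_py id_set → Spec_find_id_gaps_py id_set (find_id_gaps_py id_set)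

-- ===== LEMMAS AND PROOFS =====

def gapPairs (s : List Int) : List (Int × Int) :=
  (s.zip s.tail).filter (fun p => decide (p.2 - p.1 > 1))

def canonGaps (s : List Int) : List (Int × Int) :=
  (gapPairs s).map (fun p => (p.1 + 1, p.2 - 1))

theorem mapPairs_eq_zip_tail (s : List Int) :
    (PySem.List.pyRange 0 ((s.length : Int) - 1) 1).map
      (fun i => (PySem.List.pyGetD s i 0, PySem.List.pyGetD s (i + 1) 0))
      = s.zip s.tail := by
  apply List.ext_getElem
  · simp [PySem.List.length_pyRange_one]
  · intro k h1 h2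
    have hk : (k : Int) < (s.length : Int) - 1 := by
      simp [PySem.List.length_pyRange_one] at h1; omega
    simp only [List.getElem_map, PySem.List.getElem_pyRange_one, List.getElem_zip]
    have h0 : (0 : Int) + (k : Int) = ((k : Nat) : Int) := by omega
    rw [h0]
    have h1' : ((k : Int) + 1) = (((k + 1 : Nat)) : Int) := by push_cast; ring
    rw [h1', PySem.List.pyGetD_natCast, PySem.List.pyGetD_natCast]
    have hks : k < s.length := by omega
    have hks1 : k + 1 < s.length := by
      simp at h2; omega
    simp [List.getD, hks, hks1, List.getElem_tail]

theorem portA_eq_canon (l : List Int) :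
    find_id_gaps_py l = canonGaps (PySem.List.sorted l (fun x => x) false) := by
  by_cases hl : l = []
  · subst hl
    simp [find_id_gaps_py, canonGaps, gapPairs, PySem.List.sorted]
  · unfold find_id_gaps_py
    rw [if_neg hl]
    set s := PySem.List.sorted l (fun x => x) false with hs
    have := mapPairs_eq_zip_tail s
    calc (PySem.List.pyRange 0 ((s.length : Int) - 1) 1).foldl
          (fun gaps i =>
            let current_id := PySem.List.pyGetD s i 0
            let next_id := PySem.List.pyGetD s (i + 1) 0
            if next_id - current_id > 1 then gaps ++ [(current_id + 1, next_id - 1)] else gaps)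
          []
        = ((PySem.List.pyRange 0 ((s.length : Int) - 1) 1).map
            (fun i => (PySem.List.pyGetD s i 0, PySem.List.pyGetD s (i + 1) 0))).foldl
            (fun gaps p => if p.2 - p.1 > 1 then gaps ++ [(p.1 + 1, p.2 - 1)] else gaps) [] := by
          rw [List.foldl_map]
      _ = (s.zip s.tail).foldl
            (fun gaps p => if p.2 - p.1 > 1 then gaps ++ [(p.1 + 1, p.2 - 1)] else gaps) [] := by
          rw [mapPairs_eq_zip_tail]
      _ = canonGaps s := by
          have h := PySem.List.foldl_append_if (l := s.zip s.tail)
            (p := fun p : Int × Int => decide (p.2 - p.1 > 1))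
            (f := fun p : Int × Int => (p.1 + 1, p.2 - 1)) (acc := [])
          simp only [decide_eq_true_eq] at h
          simpa [canonGaps, gapPairs] using h

theorem filter_starts_eq (hi : Int) :
    ∀ (s : List Int), s.Pairwise (· < ·) → (∀ y ∈ s, y ≤ hi) → hi ∈ s →
    s.filter (fun x => decide (x < hi ∧ x + 1 ∉ s)) = (gapPairs s).map Prod.fst
  | [] => by intro _ _ h; simp at h
  | [a] => by
    intro _ hmax hmem
    simp at hmem
    subst hmem
    simp [gapPairs]
  | a :: b :: t => by
    intro hch hmax hmem
    have ha : ∀ y ∈ b :: t, a < y := fun y hy => (List.pairwise_cons.mp hch).1 y hy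
    have hch' : (b :: t).Pairwise (· < ·) := (List.pairwise_cons.mp hch).2
    have hb : ∀ y ∈ t, b < y := fun y hy => (List.pairwise_cons.mp hch').1 y hy
    have hab : a < b := ha b (by simp)
    have hahi : a < hi := lt_of_lt_of_le hab (hmax b (by simp))
    have hhimem : hi ∈ b :: t := by
      rcases List.mem_cons.mp hmem with h | h
      · omega
      · exact h
    -- a's condition: a+1 ∉ s ↔ b - a > 1
    have hsucc : (a + 1 ∈ a :: b :: t) ↔ b = a + 1 := by
      constructor
      · intro h
        rcases List.mem_cons.mp h with h | h
        · omega
        · rcases List.mem_cons.mp h with h | h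
          · omega
          · have := hb _ h; have := ha (a+1) (List.mem_cons.mpr (Or.inr h)); omega
      · intro h; simp [h]
    -- membership for tail elements doesn't see a
    have hcongr : ∀ x ∈ b :: t,
        (decide (x < hi ∧ x + 1 ∉ a :: b :: t) : Bool)
          = decide (x < hi ∧ x + 1 ∉ b :: t) := by
      intro x hx
      have hax : a < x := ha x hx
      have : (x + 1 ∈ a :: b :: t) ↔ (x + 1 ∈ b :: t) := by
        constructor
        · intro h; rcases List.mem_cons.mp h with h | h
          · omega
          · exact h
        · intro h; exact List.mem_cons.mpr (Or.inr h)
      simp only [decide_eq_decide]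
      tauto
    have hIH := filter_starts_eq hi (b :: t) hch' (fun y hy => hmax y (List.mem_cons.mpr (Or.inr hy))) hhimem
    rw [List.filter_cons]
    rw [List.filter_congr hcongr, hIH]
    have hg : gapPairs (a :: b :: t)
        = (if b - a > 1 then [(a, b)] else []) ++ gapPairs (b :: t) := by
      simp only [gapPairs, List.zip, List.tail]
      rw [show (a :: b :: t).zipWith Prod.mk (b :: t) = (a, b) :: (b :: t).zipWith Prod.mk t from rfl]
      rw [List.filter_cons]
      by_cases h : b - a > 1 <;> simp [h]
    rw [hg]
    by_cases hgap : b - a > 1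
    · have hc : (decide (a < hi ∧ a + 1 ∉ a :: b :: t) : Bool) = true := by
        simp only [decide_eq_true_eq]
        refine ⟨hahi, fun h => ?_⟩
        have := hsucc.mp h; omega
      rw [if_pos hc, if_pos hgap]
      simp
    · have hc : (decide (a < hi ∧ a + 1 ∉ a :: b :: t) : Bool) = false := by
        simp only [decide_eq_false_iff_not]
        intro ⟨_, h2⟩
        exact h2 (hsucc.mpr (by omega))
      rw [if_neg (by rw [hc]; simp), if_neg hgap]
      simp

theorem filter_ends_eq (lo : Int) :
    ∀ (s : List Int), s.Pairwise (· < ·) → (∀ y ∈ s, lo ≤ y) → lo ∈ s →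
    s.filter (fun y => decide (lo < y ∧ y - 1 ∉ s)) = (gapPairs s).map Prod.snd
  | [] => by intro _ _ h; simp at h
  | [a] => by
    intro _ hmin hmem
    simp at hmem
    subst hmem
    simp [gapPairs]
  | a :: b :: t => by
    intro hch hmin hmem
    have ha : ∀ y ∈ b :: t, a < y := fun y hy => (List.pairwise_cons.mp hch).1 y hy
    have hch' : (b :: t).Pairwise (· < ·) := (List.pairwise_cons.mp hch).2
    have hb : ∀ y ∈ t, b < y := fun y hy => (List.pairwise_cons.mp hch').1 y hy
    have hab : a < b := ha b (by simp)
    have hloa : lo = a := by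
      rcases List.mem_cons.mp hmem with h | h
      · omega
      · have := ha lo h
        have := hmin a (by simp)
        omega
    subst hloa
    -- head a is never an end (lo < a is false)
    have hca : (decide (lo < lo ∧ lo - 1 ∉ lo :: b :: t) : Bool) = false := by
      simp
    rw [List.filter_cons, if_neg (by rw [hca]; simp)]
    -- b's condition: b - 1 ∉ s ↔ b - a > 1  (b - 1 ∈ s ↔ b - 1 = a)
    have hpred : (b - 1 ∈ lo :: b :: t) ↔ b - 1 = lo := by
      constructor
      · intro h
        rcases List.mem_cons.mp h with h | h
        · omega
        · rcases List.mem_cons.mp h with h | h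
          · omega
          · have := hb _ h; omega
      · intro h; simp [h]
    -- tail elements: membership doesn't see a, and a < y ↔ b < y (both true)
    have hcongr : ∀ y ∈ t,
        (decide (lo < y ∧ y - 1 ∉ lo :: b :: t) : Bool)
          = decide (b < y ∧ y - 1 ∉ b :: t) := by
      intro y hy
      have hby : b < y := hb y hy
      have : (y - 1 ∈ lo :: b :: t) ↔ (y - 1 ∈ b :: t) := by
        constructor
        · intro h; rcases List.mem_cons.mp h with h | h
          · omega
          · exact h
        · intro h; exact List.mem_cons.mpr (Or.inr h)
      simp only [decide_eq_decide]
      constructor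
      · intro ⟨_, h2⟩; exact ⟨hby, fun hm => h2 (this.mpr hm)⟩
      · intro ⟨_, h2⟩; exact ⟨by omega, fun hm => h2 (this.mp hm)⟩
    have hIH := filter_ends_eq b (b :: t) hch'
      (by
        intro y hy
        rcases List.mem_cons.mp hy with h | h
        · omega
        · exact le_of_lt (hb y h)) (by simp)
    -- IH's own head b is filtered out (b < b false), leaving the tail filter
    have hIHt : List.filter (fun y => decide (b < y ∧ y - 1 ∉ b :: t)) t
        = (gapPairs (b :: t)).map Prod.snd := by
      have : List.filter (fun y => decide (b < y ∧ y - 1 ∉ b :: t)) (b :: t)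
          = List.filter (fun y => decide (b < y ∧ y - 1 ∉ b :: t)) t := by
        rw [List.filter_cons, if_neg (by simp)]
      rw [← this, hIH]
    have hg : gapPairs (lo :: b :: t)
        = (if b - lo > 1 then [(lo, b)] else []) ++ gapPairs (b :: t) := by
      simp only [gapPairs, List.zip, List.tail]
      rw [show (lo :: b :: t).zipWith Prod.mk (b :: t) = (lo, b) :: (b :: t).zipWith Prod.mk t from rfl]
      rw [List.filter_cons]
      by_cases h : b - lo > 1 <;> simp [h]
    rw [hg, List.filter_cons]
    by_cases hgap : b - lo > 1
    · have hcb : (decide (lo < b ∧ b - 1 ∉ lo :: b :: t) : Bool) = true := by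
        simp only [decide_eq_true_eq]
        exact ⟨hab, fun h => by have := hpred.mp h; omega⟩
      rw [if_pos hcb, if_pos hgap, List.filter_congr hcongr, hIHt]
      simp
    · have hcb : (decide (lo < b ∧ b - 1 ∉ lo :: b :: t) : Bool) = false := by
        simp only [decide_eq_false_iff_not]
        intro ⟨_, h2⟩
        exact h2 (hpred.mpr (by omega))
      rw [if_neg (by rw [hcb]; simp), if_neg hgap, List.filter_congr hcongr, hIHt]
      simp

theorem zip_tail_pairwise :
    ∀ (s : List Int), s.Pairwise (· < ·) →
    (s.zip s.tail).Pairwise (fun p q => p.1 < q.1 ∧ p.2 < q.2)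
  | [] => by intro _; simp
  | [a] => by intro _; simp
  | a :: b :: t => by
    intro hch
    have ha : ∀ y ∈ b :: t, a < y := fun y hy => (List.pairwise_cons.mp hch).1 y hy
    have hch' : (b :: t).Pairwise (· < ·) := (List.pairwise_cons.mp hch).2
    have hb : ∀ y ∈ t, b < y := fun y hy => (List.pairwise_cons.mp hch').1 y hy
    have hIH := zip_tail_pairwise (b :: t) hch'
    rw [show (a :: b :: t).zip (a :: b :: t).tail = (a, b) :: (b :: t).zip t from rfl]
    refine List.pairwise_cons.mpr ⟨?_, by simpa using hIH⟩
    intro q hq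
    have := List.of_mem_zip hq
    exact ⟨ha q.1 this.1, hb q.2 this.2⟩

theorem portB_eq_canon (l : List Int) (hnd : l.Nodup) :
    find_id_gaps_py_alt l = canonGaps (PySem.List.sorted l (fun x => x) false) := by
  by_cases hl : l = []
  · subst hl; simp [find_id_gaps_py_alt, canonGaps, gapPairs, PySem.List.sorted]
  · set s := PySem.List.sorted l (fun x => x) false with hs
    have hsp : s.Perm l := PySem.List.sorted_perm l (fun x => x) false
    have hmemiff : ∀ x : Int, x ∈ s ↔ x ∈ l := fun x => hsp.mem_iff
    have hchain : s.Pairwise (· < ·) := by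
      have hle : s.Pairwise (fun a b => a ≤ b) := by
        simpa using PySem.List.sorted_pairwise l (fun x => x)
      have hnods : s.Nodup := (hsp.symm).nodup hnd
      exact (hle.and hnods).imp (fun h => lt_of_le_of_ne h.1 h.2)
    -- the extrema
    obtain ⟨hiv, hhiv⟩ : ∃ m, PySem.List.max? l (fun x => x) = some m := by
      cases hmx : PySem.List.max? l (fun x => x) with
      | none => exact absurd ((PySem.List.max?_eq_none_iff l (fun x => x)).mp hmx) hl
      | some m => exact ⟨m, rfl⟩
    obtain ⟨lov, hlov⟩ : ∃ m, PySem.List.min? l (fun x => x) = some m := by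
      cases hmx : PySem.List.min? l (fun x => x) with
      | none => exact absurd ((PySem.List.min?_eq_none_iff l (fun x => x)).mp hmx) hl
      | some m => exact ⟨m, rfl⟩
    have hhimem : hiv ∈ s := (hmemiff hiv).mpr (PySem.List.max?_mem hhiv)
    have hhimax : ∀ y ∈ s, y ≤ hiv := fun y hy => PySem.List.max?_isMax hhiv y ((hmemiff y).mp hy)
    have hlomem : lov ∈ s := (hmemiff lov).mpr (PySem.List.min?_mem hlov)
    have hlomin : ∀ y ∈ s, lov ≤ y := fun y hy => PySem.List.min?_isMin hlov y ((hmemiff y).mp hy)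
    -- filters over l agree (up to permutation) with filters over s
    have hfs : (l.filter (fun x => decide (x < hiv ∧ x + 1 ∉ l))).Perm
        (s.filter (fun x => decide (x < hiv ∧ x + 1 ∉ s))) := by
      have h1 := hsp.filter (fun x => decide (x < hiv ∧ x + 1 ∉ l))
      have h2 : s.filter (fun x => decide (x < hiv ∧ x + 1 ∉ l))
          = s.filter (fun x => decide (x < hiv ∧ x + 1 ∉ s)) := by
        apply List.filter_congr
        intro x _
        simp only [decide_eq_decide]
        rw [hmemiff (x + 1)]
      rw [h2] at h1
      exact h1.symm
    have hfe : (l.filter (fun y => decide (lov < y ∧ y - 1 ∉ l))).Perm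
        (s.filter (fun y => decide (lov < y ∧ y - 1 ∉ s))) := by
      have h1 := hsp.filter (fun y => decide (lov < y ∧ y - 1 ∉ l))
      have h2 : s.filter (fun y => decide (lov < y ∧ y - 1 ∉ l))
          = s.filter (fun y => decide (lov < y ∧ y - 1 ∉ s)) := by
        apply List.filter_congr
        intro y _
        simp only [decide_eq_decide]
        rw [hmemiff (y - 1)]
      rw [h2] at h1
      exact h1.symm
    -- pairwise facts on the gap pairs
    have hgp : (gapPairs s).Pairwise (fun p q : Int × Int => p.1 < q.1 ∧ p.2 < q.2) :=
      (zip_tail_pairwise s hchain).sublist List.filter_sublist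
    -- starts
    have hstarts : PySem.List.sorted
        ((l.filter (fun x => decide (x < hiv ∧ x + 1 ∉ l))).map (fun x => x + 1))
        (fun x => x) false = (gapPairs s).map (fun p => p.1 + 1) := by
      apply PySem.List.sorted_eq_of_perm_of_pairwise_lt
      · have he : ((gapPairs s).map (fun p => p.1 + 1))
            = (s.filter (fun x => decide (x < hiv ∧ x + 1 ∉ s))).map (fun x => x + 1) := by
          rw [filter_starts_eq hiv s hchain hhimax hhimem, List.map_map]; rfl
        rw [he]
        exact (hfs.map (fun x => x + 1)).symm
      · exact List.pairwise_map.mpr (hgp.imp (fun h => by omega))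
    -- ends
    have hends : PySem.List.sorted
        ((l.filter (fun y => decide (lov < y ∧ y - 1 ∉ l))).map (fun y => y - 1))
        (fun x => x) false = (gapPairs s).map (fun p => p.2 - 1) := by
      apply PySem.List.sorted_eq_of_perm_of_pairwise_lt
      · have he : ((gapPairs s).map (fun p => p.2 - 1))
            = (s.filter (fun y => decide (lov < y ∧ y - 1 ∉ s))).map (fun y => y - 1) := by
          rw [filter_ends_eq lov s hchain hlomin hlomem, List.map_map]; rfl
        rw [he]
        exact (hfe.map (fun y => y - 1)).symm
      · exact List.pairwise_map.mpr (hgp.imp (fun h => by omega))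
    -- assemble
    unfold find_id_gaps_py_alt
    rw [if_neg hl]
    simp only [hhiv, hlov, Option.getD_some]
    rw [hstarts, hends, List.zip_map']
    simp [canonGaps]

-- ===== VERDICT (by name: the statement is the Claim_ definition above) =====
theorem find_id_gaps_py_spec : Claim_equal_find_id_gaps_py := by
  intro l _ hpre
  unfold Spec_find_id_gaps_py
  rw [portA_eq_canon, portB_eq_canon l hpre]
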